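-- pv_equiv track=rewrite | github.com/JimStyle-gb/supplier-feeds | scripts/build_copyline.py | _copyline_full_only
-- ===== SOURCE A (Python) =====
-- def _copyline_full_only(pics: list[str]) -> list[str]:
--     """# CopyLine: если есть full_ — оставляем только full_ (обычные дублируют)."""
--     if not pics:
--         return []
--     full: list[str] = []
--     other: list[str] = []
--     seen = set()
--     for u in pics:
--         u = (u or "").strip()
--         if not u:
--             continue
--         if u in seen:
--             continue
--         seen.add(u)
--         base = u.rsplit("/", 1)[-1]
--         if base.startswith("full_"):
--             full.append(u)
--         else:
--             other.append(u)
--     return full if full else other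
-- ===== SOURCE B (Python) =====
-- def _is_full(u: str) -> bool:
--     return u.rsplit("/", 1)[-1].startswith("full_")
--
--
-- def _copyline_full_only(pics: list[str]) -> list[str]:
--     cleaned: list[str] = []
--     seen = set()
--     for u in pics:
--         v = (u or "").strip()
--         if v and v not in seen:
--             seen.add(v)
--             cleaned.append(v)
--     if any(_is_full(v) for v in cleaned):
--         return [v for v in cleaned if _is_full(v)]
--     return cleaned
-- ===== Notes on version B (the rewrite author's own statement) =====
-- stated objective: simpler
-- what changed: Replaces A's single pass that partitions into two accumulator lists (full/other) with a build-then-filter decomposition: one pass builds a single deduplicated cleaned list, then a filter is applied only if any cleaned URL has a full_-prefixed basename.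
import Mathlib
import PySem

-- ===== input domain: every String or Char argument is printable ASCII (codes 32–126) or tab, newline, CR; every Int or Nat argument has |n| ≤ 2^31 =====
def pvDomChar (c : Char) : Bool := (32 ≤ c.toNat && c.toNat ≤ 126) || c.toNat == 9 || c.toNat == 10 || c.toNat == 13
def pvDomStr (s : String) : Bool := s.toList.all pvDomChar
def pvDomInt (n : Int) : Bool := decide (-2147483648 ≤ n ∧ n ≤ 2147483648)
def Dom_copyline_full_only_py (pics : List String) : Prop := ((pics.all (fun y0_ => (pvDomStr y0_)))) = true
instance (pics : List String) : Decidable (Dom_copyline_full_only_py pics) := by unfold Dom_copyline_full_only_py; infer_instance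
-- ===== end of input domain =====

-- B replaces A's one-pass partition into two accumulators (full/other) by a build-then-filter
-- decomposition (clean+dedup first, then a conditional filter); objective: simpler, same cost.

-- ===== PORT A =====
-- u.rsplit("/", 1)[-1] : with maxsplit 1 the last component is exactly the characters after the
-- LAST '/' (the whole string if no '/'); this fold computes exactly that — exact on all inputs.
def pvBaseAfterSlash (cs : List Char) : List Char :=
  cs.foldl (fun acc c => if c = '/' then [] else acc ++ [c]) []

-- base.startswith("full_") for base = u.rsplit("/",1)[-1] (shared by both Pythons verbatim)
def pvFullPred (u : String) : Bool :=
  PySem.Chars.startswith (pvBaseAfterSlash u.toList) "full_".toList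

-- A's for-loop over pics with state (full, other, seen)
def pvLoopA : List String → List String → List String → PySem.Set String →
    List String × List String × PySem.Set String
  | [], full, other, seen => (full, other, seen)
  | u :: rest, full, other, seen =>
    let v := PySem.Str.strip (if u = "" then "" else u)   -- (u or "").strip()
    if v = "" then pvLoopA rest full other seen
    else if PySem.Set.contains seen v then pvLoopA rest full other seen
    else if pvFullPred v then pvLoopA rest (full ++ [v]) other (PySem.Set.add seen v)
    else pvLoopA rest full (other ++ [v]) (PySem.Set.add seen v)

def copyline_full_only_py (pics : List String) : List String :=
  if pics = [] then []
  else
    let st := pvLoopA pics [] [] PySem.Set.empty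
    if st.1 ≠ [] then st.1 else st.2.1

-- ===== PORT B =====
-- B's single cleaning pass: state (cleaned, seen)
def pvLoopB : List String → List String → PySem.Set String → List String × PySem.Set String
  | [], cleaned, seen => (cleaned, seen)
  | u :: rest, cleaned, seen =>
    let v := PySem.Str.strip (if u = "" then "" else u)   -- (u or "").strip()
    if v ≠ "" ∧ PySem.Set.contains seen v = false then
      pvLoopB rest (cleaned ++ [v]) (PySem.Set.add seen v)
    else pvLoopB rest cleaned seen

def copyline_full_only_py_alt (pics : List String) : List String :=
  let cleaned := (pvLoopB pics [] PySem.Set.empty).1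
  if cleaned.any pvFullPred then cleaned.filter pvFullPred else cleaned

-- ===== PRECONDITION & SPEC =====
def Spec_copyline_full_only_py (pics : List String) (out : List String) : Prop := out = copyline_full_only_py_alt pics
instance (pics : List String) (out : List String) : Decidable (Spec_copyline_full_only_py pics out) := by unfold Spec_copyline_full_only_py; infer_instance

-- ===== CLAIM (what is proved, stated in full; the proofs are below) =====
def Claim_equal_copyline_full_only_py : Prop := ∀ (pics : List String), Dom_copyline_full_only_py pics → Spec_copyline_full_only_py pics (copyline_full_only_py pics)

-- ===== LEMMAS AND PROOFS =====

lemma pvLoopB_acc (rest : List String) : ∀ (c : List String) (seen : PySem.Set String),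
    pvLoopB rest c seen = (c ++ (pvLoopB rest [] seen).1, (pvLoopB rest [] seen).2) := by
  induction rest with
  | nil => intro c seen; simp [pvLoopB]
  | cons u rest ih =>
    intro c seen
    simp only [pvLoopB]
    by_cases h : PySem.Str.strip (if u = "" then "" else u) ≠ "" ∧
        PySem.Set.contains seen (PySem.Str.strip (if u = "" then "" else u)) = false
    · rw [if_pos h, if_pos h, ih (c ++ [_]), ih ([] ++ [_])]
      simp
    · rw [if_neg h, if_neg h]
      exact ih c seen

lemma pvLoopB_single (rest : List String) (v : String) (seen : PySem.Set String) :
    pvLoopB rest [v] seen = (v :: (pvLoopB rest [] seen).1, (pvLoopB rest [] seen).2) := by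
  simpa using pvLoopB_acc rest [v] seen

lemma pvLoopA_eq_loopB (rest : List String) :
    ∀ (full other : List String) (seen : PySem.Set String),
    pvLoopA rest full other seen =
      (full ++ ((pvLoopB rest [] seen).1.filter pvFullPred),
       other ++ ((pvLoopB rest [] seen).1.filter (fun v => !pvFullPred v)),
       (pvLoopB rest [] seen).2) := by
  induction rest with
  | nil => intro full other seen; simp [pvLoopA, pvLoopB]
  | cons u rest ih =>
    intro full other seen
    simp only [pvLoopA, pvLoopB]
    by_cases h1 : PySem.Str.strip (if u = "" then "" else u) = ""
    · simp [h1, ih]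
    · by_cases h2 : PySem.Str.strip (if u = "" then "" else u) ∈ seen
      · simp [h1, h2, ih]
      · by_cases h3 : pvFullPred (PySem.Str.strip (if u = "" then "" else u)) = true
        · simp [h1, h2, h3, ih, pvLoopB_single]
        · have h3' : pvFullPred (PySem.Str.strip (if u = "" then "" else u)) = false := by
            simpa using h3
          simp [h1, h2, h3', ih, pvLoopB_single]

lemma copyline_eq (pics : List String) :
    copyline_full_only_py pics = copyline_full_only_py_alt pics := by
  by_cases hnil : pics = []
  · subst hnil; simp [copyline_full_only_py, copyline_full_only_py_alt, pvLoopB]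
  · unfold copyline_full_only_py copyline_full_only_py_alt
    rw [if_neg hnil]
    rw [pvLoopA_eq_loopB]
    set c := (pvLoopB pics [] PySem.Set.empty).1 with hc
    simp only [List.nil_append]
    by_cases hany : c.any pvFullPred = true
    · have : c.filter pvFullPred ≠ [] := by
        obtain ⟨x, hx, hpx⟩ := List.any_eq_true.mp hany
        intro hnil'
        have := List.filter_eq_nil_iff.mp hnil' x hx
        simp [hpx] at this
      simp [hany, this]
    · have hall : ∀ x ∈ c, pvFullPred x = false := by
        intro x hx
        by_contra h
        exact hany (List.any_eq_true.mpr ⟨x, hx, by simpa using h⟩)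
      have h1 : c.filter pvFullPred = [] := List.filter_eq_nil_iff.mpr (by
        intro x hx; simp [hall x hx])
      have h2 : c.filter (fun v => !pvFullPred v) = c := List.filter_eq_self.mpr (by
        intro x hx; simp [hall x hx])
      simp [hany, h1, h2]

-- ===== VERDICT (by name: the statement is the Claim_ definition above) =====
theorem copyline_full_only_py_spec : Claim_equal_copyline_full_only_py := by
  intro pics _
  exact copyline_eq pics
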